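-- pv_equiv track=rewrite | github.com/en0ndev/LeakLens | src/leaklens/detectors/context.py | _has_diverse_chars
-- ===== SOURCE A (Python) =====
-- def _has_diverse_chars(value: str) -> bool:
--     classes = sum(
--         [
--             any(char.islower() for char in value),
--             any(char.isupper() for char in value),
--             any(char.isdigit() for char in value),
--             any(not char.isalnum() for char in value),
--         ]
--     )
--     return classes >= 2
-- ===== SOURCE B (Python) =====
-- def _has_diverse_chars(value: str) -> bool:
--     lo = up = di = ot = False
--     for char in value:
--         lo = lo or char.islower()
--         up = up or char.isupper()
--         di = di or char.isdigit()
--         ot = ot or not char.isalnum()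
--         if lo + up + di + ot >= 2:
--             return True
--     return False
-- ===== Notes on version B (the rewrite author's own statement) =====
-- stated objective: alternative
-- what changed: Replaces four independent full scans summed at the end with a single pass maintaining four class flags and returning True as soon as two classes have been seen.
import Mathlib
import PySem

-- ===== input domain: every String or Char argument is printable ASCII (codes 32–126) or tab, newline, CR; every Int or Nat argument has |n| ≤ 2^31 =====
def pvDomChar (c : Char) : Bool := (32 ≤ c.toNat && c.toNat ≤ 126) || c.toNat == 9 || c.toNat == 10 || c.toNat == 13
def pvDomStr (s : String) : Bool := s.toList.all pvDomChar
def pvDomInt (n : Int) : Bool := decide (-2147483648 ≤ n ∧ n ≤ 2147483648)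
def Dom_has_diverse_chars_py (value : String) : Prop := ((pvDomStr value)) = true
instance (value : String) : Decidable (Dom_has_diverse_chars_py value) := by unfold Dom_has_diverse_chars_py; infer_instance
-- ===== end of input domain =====

-- B replaces A's four independent full scans (summed at the end) with one pass
-- over the characters keeping four class flags and exiting as soon as two classes appear.


-- ===== PORT A =====
def has_diverse_chars_py (value : String) : Bool :=
  let classes : Nat :=
    ([value.toList.any (fun char => PySem.Chars.islower char),
      value.toList.any (fun char => PySem.Chars.isupper char),
      value.toList.any (fun char => PySem.Chars.isdigit char),
      value.toList.any (fun char => !PySem.Chars.isalnum char)].map Bool.toNat).sum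
  decide (classes ≥ 2)

-- ===== PORT B =====
def hdcAltLoop : List Char → Bool → Bool → Bool → Bool → Bool
  | [], _, _, _, _ => false
  | char :: rest, lo, up, di, ot =>
    let lo' := lo || PySem.Chars.islower char
    let up' := up || PySem.Chars.isupper char
    let di' := di || PySem.Chars.isdigit char
    let ot' := ot || !PySem.Chars.isalnum char
    if lo'.toNat + up'.toNat + di'.toNat + ot'.toNat ≥ 2 then true
    else hdcAltLoop rest lo' up' di' ot'

def has_diverse_chars_py_alt (value : String) : Bool :=
  hdcAltLoop value.toList false false false false

-- ===== PRECONDITION & SPEC =====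
def Spec_has_diverse_chars_py (value : String) (out : Bool) : Prop := out = has_diverse_chars_py_alt value
instance (value : String) (out : Bool) : Decidable (Spec_has_diverse_chars_py value out) := by unfold Spec_has_diverse_chars_py; infer_instance

-- ===== CLAIM (what is proved, stated in full; the proofs are below) =====
def Claim_equal_has_diverse_chars_py : Prop := ∀ (value : String), Dom_has_diverse_chars_py value → Spec_has_diverse_chars_py value (has_diverse_chars_py value)

-- ===== LEMMAS AND PROOFS =====

-- Loop invariant: as long as fewer than two flags are set, the loop's answer is
-- "the flags OR-accumulated over the whole remaining list count at least 2".
theorem hdcAltLoop_eq (l : List Char) (lo up di ot : Bool)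
    (h : lo.toNat + up.toNat + di.toNat + ot.toNat ≤ 1) :
    hdcAltLoop l lo up di ot =
      decide ((lo || l.any (fun c => PySem.Chars.islower c)).toNat
            + (up || l.any (fun c => PySem.Chars.isupper c)).toNat
            + (di || l.any (fun c => PySem.Chars.isdigit c)).toNat
            + (ot || l.any (fun c => !PySem.Chars.isalnum c)).toNat ≥ 2) := by
  induction l generalizing lo up di ot with
  | nil =>
    simp only [hdcAltLoop, List.any_nil, Bool.or_false]
    symm
    rw [decide_eq_false_iff_not]
    omega
  | cons c rest ih =>
    simp only [hdcAltLoop, List.any_cons]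
    split
    · rename_i h2
      -- the whole-list flags dominate the one-step flags, so the count stays ≥ 2
      have k : ∀ (p q : Bool), p.toNat ≤ (p || q).toNat := by decide
      symm
      rw [decide_eq_true_iff]
      simp only [← Bool.or_assoc]
      have := k (lo || PySem.Chars.islower c) (rest.any fun c => PySem.Chars.islower c)
      have := k (up || PySem.Chars.isupper c) (rest.any fun c => PySem.Chars.isupper c)
      have := k (di || PySem.Chars.isdigit c) (rest.any fun c => PySem.Chars.isdigit c)
      have := k (ot || !PySem.Chars.isalnum c) (rest.any fun c => !PySem.Chars.isalnum c)
      omega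
    · rename_i h2
      rw [ih _ _ _ _ (by omega)]
      apply decide_eq_decide.mpr
      simp only [Bool.or_assoc]

-- ===== VERDICT (by name: the statement is the Claim_ definition above) =====
theorem has_diverse_chars_py_spec : Claim_equal_has_diverse_chars_py := by
  intro value _
  unfold Spec_has_diverse_chars_py has_diverse_chars_py has_diverse_chars_py_alt
  rw [hdcAltLoop_eq _ _ _ _ _ (by simp)]
  simp only [Bool.false_or, List.map, List.sum_cons, List.sum_nil]
  apply decide_eq_decide.mpr
  omega
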